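-- pv_equiv track=rewrite | github.com/seoul0809/algorithm-study-2nd | heeheej/week21/PRG_1845_폰켓몬.py | solution
-- ===== SOURCE A (Python) =====
-- def solution(nums):
--     answer = 0
--     d = dict()
--     for x in nums:
--         if x in d:
--             d[x] += 1
--         else:
--             d[x] = 1
--     N = len(nums)
--     max_len = len(d)
--     if max_len < N//2:
--         answer = max_len
--     else:
--         answer = N//2
--     return answer
-- ===== SOURCE B (Python) =====
-- def solution(nums):
--     s = sorted(nums)
--     if not s:
--         distinct = 0
--     else:
--         distinct = 1
--         for i in range(1, len(s)):
--             if s[i] != s[i - 1]: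
--                 distinct += 1
--     return min(distinct, len(nums) // 2)
-- ===== Notes on version B (the rewrite author's own statement) =====
-- stated objective: alternative
-- what changed: Replaces the hash-map frequency count with sort-then-scan: B sorts a copy of nums and counts distinct values by comparing each element with its predecessor, then takes min(distinct, len(nums)//2) instead of A's if/else.
import Mathlib
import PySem

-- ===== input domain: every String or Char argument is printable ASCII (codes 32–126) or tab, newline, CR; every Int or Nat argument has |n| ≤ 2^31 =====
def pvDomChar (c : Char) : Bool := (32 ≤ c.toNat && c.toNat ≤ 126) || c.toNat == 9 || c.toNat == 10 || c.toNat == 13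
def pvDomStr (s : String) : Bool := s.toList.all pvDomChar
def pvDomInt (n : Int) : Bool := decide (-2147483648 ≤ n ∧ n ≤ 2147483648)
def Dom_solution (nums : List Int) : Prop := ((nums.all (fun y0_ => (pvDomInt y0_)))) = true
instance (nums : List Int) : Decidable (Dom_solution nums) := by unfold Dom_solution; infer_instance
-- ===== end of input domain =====

-- B counts distinct values by a sort-then-scan instead of A's hash map; same result, different strategy.

-- ===== PORT A =====
-- the counting loop: if x in d: d[x] += 1 else: d[x] = 1
def solution (nums : List Int) : Int :=
  let d : PySem.Dict Int Int :=
    nums.foldl (fun d x => if d.contains x then d.insert x (d.getD x 0 + 1) else d.insert x 1)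
      PySem.Dict.empty
  let N : Int := nums.length
  let maxLen : Int := d.size
  if maxLen < PySem.Int.floordiv N 2 then maxLen else PySem.Int.floordiv N 2

-- ===== PORT B =====
-- the for-i-in-range(1, len(s)) scan comparing s[i] with s[i-1], carried as (prev, acc)
def solutionAltGo (prev : Int) (acc : Int) : List Int → Int
  | [] => acc
  | y :: t => solutionAltGo y (if y ≠ prev then acc + 1 else acc) t

def solution_alt (nums : List Int) : Int :=
  let s := PySem.List.sorted nums (fun x => x) false
  let distinct : Int :=
    match s with
    | [] => 0
    | h :: t => solutionAltGo h 1 t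
  min distinct (PySem.Int.floordiv (nums.length : Int) 2)

-- ===== PRECONDITION & SPEC =====
def Spec_solution (nums : List Int) (out : Int) : Prop := out = solution_alt nums
instance (nums : List Int) (out : Int) : Decidable (Spec_solution nums out) := by unfold Spec_solution; infer_instance

-- ===== CLAIM (what is proved, stated in full; the proofs are below) =====
def Claim_equal_solution : Prop := ∀ (nums : List Int), Dom_solution nums → Spec_solution nums (solution nums)

-- ===== LEMMAS AND PROOFS =====

-- A's step function is extensionally the canonical counter step
lemma solution_step_eq :
    (fun (d : PySem.Dict Int Int) (x : Int) =>
        if d.contains x then d.insert x (d.getD x 0 + 1) else d.insert x 1)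
    = (fun (d : PySem.Dict Int Int) (x : Int) => d.insert x (d.getD x 0 + 1)) := by
  funext d x
  by_cases h : d.contains x = true
  · simp [h]
  · simp only [Bool.not_eq_true] at h
    simp [h, PySem.Dict.getD_of_not_contains d 0 h]

-- distinct count of A = length of the first-occurrence dedup of nums
lemma solution_dict_size (nums : List Int) :
    (nums.foldl (fun d x => if d.contains x then d.insert x (d.getD x 0 + 1) else d.insert x 1)
      (PySem.Dict.empty : PySem.Dict Int Int)).size
    = (PySem.Set.ofList nums).length := by
  rw [solution_step_eq, PySem.Dict.foldl_insert_getD_add_one_eq_counter]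
  have hk := PySem.Dict.keys_counter (κ := Int) nums
  have : (PySem.Dict.counter nums : PySem.Dict Int Int).size
      = (PySem.Dict.counter nums : PySem.Dict Int Int).keys.length := by
    simp [PySem.Dict.size, PySem.Dict.keys]
  rw [this, hk]

-- B's scan over a weakly increasing list counts the distinct elements
lemma solutionAltGo_sorted (t : List Int) : ∀ (h : Int) (acc : Int),
    (h :: t).Pairwise (· ≤ ·) →
    solutionAltGo h acc t = acc + ((h :: t).toFinset.card : Int) - 1 := by
  induction t with
  | nil => intro h acc _; simp [solutionAltGo]
  | cons b t ih =>
    intro h acc hp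
    have hp' : (b :: t).Pairwise (· ≤ ·) := hp.of_cons
    by_cases hb : b = h
    · subst hb
      simp only [solutionAltGo, ne_eq, not_true_eq_false, if_false]
      rw [ih b acc hp']
      simp
    · have hle : ∀ x ∈ b :: t, h ≤ x := fun x hx => (List.pairwise_cons.mp hp).1 x hx
      have hlt : h < b := lt_of_le_of_ne (hle b (by simp)) (Ne.symm hb)
      have hnotmem : h ∉ (b :: t) := by
        intro hm
        rcases List.mem_cons.mp hm with h1 | h2
        · exact hb h1.symm
        · have := (List.pairwise_cons.mp hp').1 h h2
          omega
      simp only [solutionAltGo, ne_eq, hb, not_false_eq_true, if_true]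
      rw [ih b (acc + 1) hp']
      have hnm : h ∉ insert b t.toFinset := by
        simp only [List.mem_cons, not_or] at hnotmem
        simp [Finset.mem_insert, List.mem_toFinset, hnotmem.1, hnotmem.2]
      have : (h :: b :: t).toFinset.card = (b :: t).toFinset.card + 1 := by
        simp only [List.toFinset_cons]
        exact Finset.card_insert_of_notMem hnm
      rw [this]
      push_cast
      ring

lemma ofList_length_eq_card (xs : List Int) :
    ((PySem.Set.ofList xs).length : Int) = (xs.toFinset.card : Int) := by
  have hnd := PySem.Set.nodup_ofList (xs := xs)
  have : (PySem.Set.ofList xs).toFinset = xs.toFinset := by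
    ext a; simp [List.mem_toFinset, PySem.Set.mem_ofList]
  rw [← List.toFinset_card_of_nodup hnd, this]

-- ===== VERDICT (by name: the statement is the Claim_ definition above) =====
theorem solution_spec : Claim_equal_solution := by
  intro nums _
  unfold Spec_solution
  simp only [solution, solution_alt]
  rw [solution_dict_size, ofList_length_eq_card]
  have hperm : (PySem.List.sorted nums (fun x => x) false).Perm nums :=
    PySem.List.sorted_perm ..
  have hfin : (PySem.List.sorted nums (fun x => x) false).toFinset = nums.toFinset := by
    ext a; simp [List.mem_toFinset, hperm.mem_iff]
  cases hs : PySem.List.sorted nums (fun x => x) false with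
  | nil =>
    have hp0 : ([] : List Int).Perm nums := hs ▸ hperm
    have : nums = [] := hp0.symm.eq_nil
    subst this
    simp [PySem.Int.floordiv]
  | cons h t =>
    have hpw : (h :: t).Pairwise (fun a b => a ≤ b) := by
      have := PySem.List.sorted_pairwise (xs := nums) (key := fun x : Int => x)
      rw [hs] at this; simpa using this
    rw [show (match h :: t with | [] => (0:Int) | h :: t => solutionAltGo h 1 t)
          = solutionAltGo h 1 t from rfl,
        solutionAltGo_sorted t h 1 hpw, ← hs, hfin]
    have hcard : (0 : Int) ≤ (nums.toFinset.card : Int) := by positivity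
    simp only [min_def]
    split_ifs <;> omega
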